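-- pv_equiv track=rewrite | github.com/cds-snc/notification-admin | app/notify_client/notification_counts_client.py | _aggregate_stats_from_service_api
-- ===== SOURCE A (Python) =====
-- def _aggregate_stats_from_service_api(stats):
--     """Aggregate monthly notification stats excluding cancelled"""
--     total_stats = {"sms": {}, "email": {}}
--
--     for month_data in stats.values():
--         for msg_type in ["sms", "email"]:
--             if msg_type in month_data:
--                 for status, count in month_data[msg_type].items():
--                     if status != "cancelled":
--                         if status not in total_stats[msg_type]:
--                             total_stats[msg_type][status] = 0
--                         total_stats[msg_type][status] += count
--
--     return {msg_type: sum(counts.values()) for msg_type, counts in total_stats.items()}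
-- ===== SOURCE B (Python) =====
-- def _aggregate_stats_from_service_api(stats):
--     """Aggregate monthly notification stats excluding cancelled"""
--     def month_total(months, msg_type):
--         total = 0
--         for md in months:
--             d = md.get(msg_type, {})
--             total += sum(d.values()) - d.get("cancelled", 0)
--         return total
--
--     months = list(stats.values())
--     return {"sms": month_total(months, "sms"), "email": month_total(months, "email")}
-- ===== Notes on version B (the rewrite author's own statement) =====
-- stated objective: alternative
-- what changed: B excludes cancelled counts by arithmetic (sum of each status dict's values minus its cancelled entry, via one accumulator loop per message type) instead of A's per-status filtering into grouping dicts plus a final summing comprehension.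
import Mathlib
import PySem

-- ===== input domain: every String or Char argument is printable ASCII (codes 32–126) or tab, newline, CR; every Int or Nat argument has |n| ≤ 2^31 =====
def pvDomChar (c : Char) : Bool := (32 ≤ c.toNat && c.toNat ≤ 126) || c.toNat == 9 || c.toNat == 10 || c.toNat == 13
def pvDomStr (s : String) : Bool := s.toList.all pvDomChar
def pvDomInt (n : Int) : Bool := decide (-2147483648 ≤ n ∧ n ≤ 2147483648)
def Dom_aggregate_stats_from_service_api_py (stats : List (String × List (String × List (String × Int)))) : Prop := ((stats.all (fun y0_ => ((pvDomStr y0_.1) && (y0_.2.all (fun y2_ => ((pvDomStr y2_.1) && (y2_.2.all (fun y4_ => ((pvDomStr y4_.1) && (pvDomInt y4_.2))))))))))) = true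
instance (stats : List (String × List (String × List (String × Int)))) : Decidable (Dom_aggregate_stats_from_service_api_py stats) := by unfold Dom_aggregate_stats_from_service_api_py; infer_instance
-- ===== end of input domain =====

-- B excludes cancelled counts arithmetically (sum of each status dict's values minus its
-- cancelled entry, one accumulator loop per message type) instead of A's nested loops grouping
-- into per-status dicts and a final summing comprehension (objective: alternative; no speed claim).

-- ===== PORT A =====
-- A's innermost loop body: 'if status != "cancelled": setdefault 0; += count'
def pvStatusStep (d : PySem.Dict String Int) (p : String × Int) : PySem.Dict String Int :=
  if p.1 ≠ "cancelled" then
    let d1 := if d.contains p.1 then d else d.insert p.1 0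
    d1.insert p.1 (d1.getD p.1 0 + p.2)
  else d

-- A's loop body for one month_data: 'for msg_type in ["sms", "email"]: if msg_type in month_data: …'
def pvMonthStep (ts : PySem.Dict String (PySem.Dict String Int))
    (md : List (String × List (String × Int))) : PySem.Dict String (PySem.Dict String Int) :=
  (["sms", "email"]).foldl (fun ts mt =>
    if (PySem.Dict.mk md).contains mt then
      ts.insert mt (((PySem.Dict.mk md).getD mt []).foldl pvStatusStep (ts.getD mt PySem.Dict.empty))
    else ts) ts

def aggregate_stats_from_service_api_py (stats : List (String × List (String × List (String × Int)))) : List (String × Int) :=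
  let ts0 : PySem.Dict String (PySem.Dict String Int) :=
    PySem.Dict.mk [("sms", PySem.Dict.empty), ("email", PySem.Dict.empty)]
  let ts := (stats.map Prod.snd).foldl pvMonthStep ts0
  ts.items.map (fun q => (q.1, q.2.values.sum))

-- ===== PORT B =====
-- B's helper month_total(months, msg_type): one accumulator loop over the months
def pvMonthTotal (months : List (List (String × List (String × Int)))) (mt : String) : Int :=
  months.foldl (fun total md =>
    let d := (PySem.Dict.mk md).getD mt []
    total + ((PySem.Dict.mk d).values.sum - (PySem.Dict.mk d).getD "cancelled" 0)) 0

def aggregate_stats_from_service_api_py_alt (stats : List (String × List (String × List (String × Int)))) : List (String × Int) :=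
  let months := stats.map Prod.snd
  [("sms", pvMonthTotal months "sms"), ("email", pvMonthTotal months "email")]

-- ===== PRECONDITION & SPEC =====
-- Pre_ excludes inputs whose innermost status association lists repeat a status key: such
-- lists do not encode a Python dict (A's argument is a dict of dicts of dicts, so duplicate
-- status keys can never reach A), and the two list encodings diverge only there.
def Pre_aggregate_stats_from_service_api_py (stats : List (String × List (String × List (String × Int)))) : Prop :=
  ∀ p ∈ stats, ∀ q ∈ p.2, (q.2.map Prod.fst).Nodup
instance (stats : List (String × List (String × List (String × Int)))) : Decidable (Pre_aggregate_stats_from_service_api_py stats) := by unfold Pre_aggregate_stats_from_service_api_py; infer_instance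

def pvWitness_aggregate_stats_from_service_api_py : (List (String × List (String × List (String × Int)))) :=
  [("2024-01", [("sms", [("delivered", 3), ("cancelled", 1)]), ("email", [("sent", 2)])])]

def Spec_aggregate_stats_from_service_api_py (stats : List (String × List (String × List (String × Int)))) (out : List (String × Int)) : Prop := out = aggregate_stats_from_service_api_py_alt stats
instance (stats : List (String × List (String × List (String × Int)))) (out : List (String × Int)) : Decidable (Spec_aggregate_stats_from_service_api_py stats out) := by unfold Spec_aggregate_stats_from_service_api_py; infer_instance

-- ===== CLAIM (what is proved, stated in full; the proofs are below) =====
def Claim_equal_aggregate_stats_from_service_api_py : Prop := ∀ (stats : List (String × List (String × List (String × Int)))), Dom_aggregate_stats_from_service_api_py stats → Pre_aggregate_stats_from_service_api_py stats → Spec_aggregate_stats_from_service_api_py stats (aggregate_stats_from_service_api_py stats)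

-- ===== LEMMAS AND PROOFS =====

-- A's per-month contribution for one message type (what its grouping dict finally sums to)
def pvContrib (mt : String) (md : List (String × List (String × Int))) : Int :=
  ((((PySem.Dict.mk md).getD mt []).filter (fun q => q.1 ≠ "cancelled")).map Prod.snd).sum

-- inserting 'getD k 0 + c' at key k raises the values-sum by exactly c (keys unique)
lemma sum_values_insert_add (l : List (String × Int)) (h : (l.map Prod.fst).Nodup) (k : String) (c : Int) :
    (((PySem.Dict.mk l).insert k ((PySem.Dict.mk l).getD k 0 + c)).values).sum = (l.map Prod.snd).sum + c := by
  induction l with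
  | nil => simp [PySem.Dict.insert, PySem.Dict.contains, PySem.Dict.getD, PySem.Dict.get?, PySem.Dict.values]
  | cons a l ih =>
    simp only [List.map_cons, List.nodup_cons] at h
    by_cases hk : a.1 = k
    · subst hk
      have hnot : ∀ p ∈ l, p.1 ≠ a.1 := by
        intro p hp hpk
        exact h.1 (List.mem_map.mpr ⟨p, hp, hpk⟩)
      simp [PySem.Dict.insert, PySem.Dict.contains, PySem.Dict.getD, PySem.Dict.get?, PySem.Dict.values]
      have hmap : List.map ((fun x => x.2) ∘ fun p => if p.1 = a.1 then (a.1, a.2 + c) else p) l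
          = List.map Prod.snd l :=
        List.map_congr_left (fun p hp => by simp [Function.comp, hnot p hp])
      rw [hmap]; ring
    · have hbk : (a.1 == k) = false := by simpa using hk
      have := ih h.2
      simp only [PySem.Dict.insert, PySem.Dict.contains, PySem.Dict.getD, PySem.Dict.get?,
        PySem.Dict.values, List.any_cons, hbk, Bool.false_or, List.find?_cons,
        List.map_cons, List.sum_cons] at this ⊢
      by_cases hc : (l.any (fun p => p.1 == k)) = true
      · simp only [hc, if_pos, List.map_cons, List.sum_cons] at this ⊢
        simp only [this, Bool.false_eq_true, if_false]
        omega
      · simp only [hc, if_neg, Bool.false_eq_true, not_false_eq_true, List.map_append,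
          List.sum_append, List.map_cons, List.sum_cons] at this ⊢
        omega

lemma pvStatusStep_nodup (d : PySem.Dict String Int) (h : d.keys.Nodup) (p : String × Int) :
    (pvStatusStep d p).keys.Nodup := by
  unfold pvStatusStep
  split
  · split
    · exact PySem.Dict.nodup_keys_insert _ _ _ h
    · exact PySem.Dict.nodup_keys_insert _ _ _ (PySem.Dict.nodup_keys_insert _ _ _ h)
  · exact h

lemma pvStatusStep_sum (d : PySem.Dict String Int) (h : d.keys.Nodup) (p : String × Int) :
    (pvStatusStep d p).values.sum = d.values.sum + (if p.1 ≠ "cancelled" then p.2 else 0) := by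
  obtain ⟨l⟩ := d
  have hkeys : (PySem.Dict.mk l).keys = l.map Prod.fst := rfl
  rw [hkeys] at h
  unfold pvStatusStep
  by_cases hp : p.1 ≠ "cancelled"
  · rw [if_pos hp, if_pos hp]
    by_cases hc : (PySem.Dict.mk l).contains p.1 = true
    · simp only [hc, if_pos]
      exact sum_values_insert_add l h p.1 p.2
    · simp only [hc, Bool.false_eq_true, if_neg, not_false_eq_true]
      have hins : (PySem.Dict.mk l).insert p.1 0 = PySem.Dict.mk (l ++ [(p.1, 0)]) := by
        simp only [PySem.Dict.insert]
        rw [if_neg (by simpa using hc)]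
      rw [hins]
      have hmem : p.1 ∉ l.map Prod.fst := by
        intro hx
        rcases List.mem_map.mp hx with ⟨q, hq, he⟩
        refine hc ?_
        simp only [PySem.Dict.contains]
        exact List.any_eq_true.mpr ⟨q, hq, by simp [he]⟩
      have hnd2 : ((l ++ [(p.1, 0)]).map Prod.fst).Nodup := by
        simp only [List.map_append, List.map_cons, List.map_nil]
        exact List.Nodup.append h (by simp)
          (fun x hx hy => by simp only [List.mem_singleton] at hy; subst hy; exact hmem hx)
      rw [sum_values_insert_add (l ++ [(p.1, 0)]) hnd2 p.1 p.2]
      simp [PySem.Dict.values]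
  · rw [if_neg hp, if_neg hp]
    simp

lemma groupFold_spec (grp : List (String × Int)) : ∀ (d : PySem.Dict String Int), d.keys.Nodup →
    ((grp.foldl pvStatusStep d).values.sum
        = d.values.sum + ((grp.filter (fun q => q.1 ≠ "cancelled")).map Prod.snd).sum)
      ∧ (grp.foldl pvStatusStep d).keys.Nodup := by
  induction grp with
  | nil =>
    intro d hd
    refine ⟨by simp, by simpa using hd⟩
  | cons p grp ih =>
    intro d hd
    have h1 := pvStatusStep_sum d hd p
    have h2 := pvStatusStep_nodup d hd p
    obtain ⟨ihs, ihn⟩ := ih (pvStatusStep d p) h2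
    constructor
    · simp only [List.foldl_cons, ihs, h1, List.filter_cons]
      by_cases hp : p.1 ≠ "cancelled"
      · simp [hp]
        ring
      · have hp' : p.1 = "cancelled" := not_not.mp (by simpa using hp)
        simp [hp']
    · simpa using ihn

lemma monthsFold_spec (ms : List (List (String × List (String × Int)))) :
    ∀ (ds de : PySem.Dict String Int), ds.keys.Nodup → de.keys.Nodup →
    ∃ ds' de',
      ms.foldl pvMonthStep (PySem.Dict.mk [("sms", ds), ("email", de)])
        = PySem.Dict.mk [("sms", ds'), ("email", de')]
      ∧ ds'.keys.Nodup ∧ de'.keys.Nodup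
      ∧ ds'.values.sum = ds.values.sum + (ms.map (pvContrib "sms")).sum
      ∧ de'.values.sum = de.values.sum + (ms.map (pvContrib "email")).sum := by
  induction ms with
  | nil => intro ds de hs he; exact ⟨ds, de, rfl, hs, he, by simp, by simp⟩
  | cons md ms ih =>
    intro ds de hs he
    have hgetS : (PySem.Dict.mk [("sms", ds), ("email", de)]).getD "sms" PySem.Dict.empty = ds := rfl
    have hmonth : pvMonthStep (PySem.Dict.mk [("sms", ds), ("email", de)]) md
        = PySem.Dict.mk [("sms", ((PySem.Dict.mk md).getD "sms" []).foldl pvStatusStep ds),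
                         ("email", ((PySem.Dict.mk md).getD "email" []).foldl pvStatusStep de)] := by
      unfold pvMonthStep
      simp only [List.foldl_cons, List.foldl_nil]
      by_cases hcs : (PySem.Dict.mk md).contains "sms" = true
      all_goals by_cases hce : (PySem.Dict.mk md).contains "email" = true
      all_goals simp only [hcs, hce, if_pos, Bool.false_eq_true, if_neg, not_false_eq_true, hgetS]
      · rfl
      · rw [PySem.Dict.getD_of_not_contains (PySem.Dict.mk md) ([] : List (String × Int))
              (Bool.eq_false_iff.mpr hce)]
        rfl
      · rw [PySem.Dict.getD_of_not_contains (PySem.Dict.mk md) ([] : List (String × Int))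
              (Bool.eq_false_iff.mpr hcs)]
        rfl
      · rw [PySem.Dict.getD_of_not_contains (PySem.Dict.mk md) ([] : List (String × Int))
              (Bool.eq_false_iff.mpr hcs),
            PySem.Dict.getD_of_not_contains (PySem.Dict.mk md) ([] : List (String × Int))
              (Bool.eq_false_iff.mpr hce)]
        rfl
    obtain ⟨hs1, hn1⟩ := groupFold_spec ((PySem.Dict.mk md).getD "sms" []) ds hs
    obtain ⟨he1, hn2⟩ := groupFold_spec ((PySem.Dict.mk md).getD "email" []) de he
    obtain ⟨ds', de', heq, hnd1, hnd2, hsum1, hsum2⟩ :=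
      ih (((PySem.Dict.mk md).getD "sms" []).foldl pvStatusStep ds)
         (((PySem.Dict.mk md).getD "email" []).foldl pvStatusStep de) hn1 hn2
    refine ⟨ds', de', ?_, hnd1, hnd2, ?_, ?_⟩
    · rw [List.foldl_cons, hmonth, heq]
    · rw [hsum1, hs1]
      simp only [List.map_cons, List.sum_cons, pvContrib]
      ring
    · rw [hsum2, he1]
      simp only [List.map_cons, List.sum_cons, pvContrib]
      ring

-- with unique status keys, filtering out 'cancelled' = total minus the cancelled entry
lemma filter_sum_eq_sub (l : List (String × Int)) (h : (l.map Prod.fst).Nodup) :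
    ((l.filter (fun q => q.1 ≠ "cancelled")).map Prod.snd).sum
      = (PySem.Dict.mk l).values.sum - (PySem.Dict.mk l).getD "cancelled" 0 := by
  induction l with
  | nil => simp [PySem.Dict.values, PySem.Dict.getD, PySem.Dict.get?]
  | cons a l ih =>
    simp only [List.map_cons, List.nodup_cons] at h
    have ih' := ih h.2
    by_cases ha : a.1 = "cancelled"
    · have hnoc : ∀ p ∈ l, ¬ p.1 = "cancelled" := fun p hp hpk =>
        h.1 (ha ▸ List.mem_map.mpr ⟨p, hp, hpk⟩)
      have hfilter : List.filter (fun q => !decide (q.1 = "cancelled")) l = l :=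
        List.filter_eq_self.mpr (fun p hp => by simp [hnoc p hp])
      have hfind : l.find? (fun p => p.1 == "cancelled") = none :=
        List.find?_eq_none.mpr (fun p hp => by simpa using hnoc p hp)
      simp [ha, PySem.Dict.values, PySem.Dict.getD, PySem.Dict.get?, hfilter]
    · have hba : (a.1 == "cancelled") = false := by simpa using ha
      rw [List.filter_cons, if_pos (by simpa using ha)]
      simp only [List.map_cons, List.sum_cons, PySem.Dict.values, PySem.Dict.getD,
        PySem.Dict.get?, List.find?_cons, hba] at ih' ⊢
      rw [ih']
      ring

-- getD returns [] or one of md's stored inner lists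
lemma getD_nil_or_mem (md : List (String × List (String × Int))) (mt : String) :
    (PySem.Dict.mk md).getD mt [] = [] ∨ (PySem.Dict.mk md).getD mt [] ∈ md.map Prod.snd := by
  simp only [PySem.Dict.getD, PySem.Dict.get?]
  cases hf : md.find? (fun p => p.1 == mt) with
  | none => left; rfl
  | some q =>
    right
    simp only [Option.map_some, Option.getD_some]
    exact List.mem_map.mpr ⟨q, List.mem_of_find?_eq_some hf, rfl⟩

lemma monthTotal_eq (mt : String) (ms : List (List (String × List (String × Int))))
    (h : ∀ md ∈ ms, ∀ q ∈ md, (q.2.map Prod.fst).Nodup) :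
    pvMonthTotal ms mt = (ms.map (pvContrib mt)).sum := by
  suffices hgen : ∀ acc : Int, ms.foldl (fun total md =>
      let d := (PySem.Dict.mk md).getD mt []
      total + ((PySem.Dict.mk d).values.sum - (PySem.Dict.mk d).getD "cancelled" 0)) acc
        = acc + (ms.map (pvContrib mt)).sum by
    simpa [pvMonthTotal] using hgen 0
  induction ms with
  | nil => intro acc; simp
  | cons md ms ih =>
    have hd : pvContrib mt md
        = (PySem.Dict.mk ((PySem.Dict.mk md).getD mt [])).values.sum
          - (PySem.Dict.mk ((PySem.Dict.mk md).getD mt [])).getD "cancelled" 0 := by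
      rcases getD_nil_or_mem md mt with hnil | hmem
      · unfold pvContrib
        rw [hnil]
        simp [PySem.Dict.values, PySem.Dict.getD, PySem.Dict.get?]
      · rcases List.mem_map.mp hmem with ⟨q, hq, hqe⟩
        exact filter_sum_eq_sub _ (hqe ▸ h md List.mem_cons_self q hq)
    intro acc
    simp only [List.foldl_cons, List.map_cons, List.sum_cons,
      ih (fun m hm => h m (List.mem_cons_of_mem _ hm))]
    rw [← hd]
    ring

-- ===== VERDICT (by name: the statement is the Claim_ definition above) =====
theorem aggregate_stats_from_service_api_py_spec : Claim_equal_aggregate_stats_from_service_api_py := by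
  intro stats _ hpre
  unfold Spec_aggregate_stats_from_service_api_py
  obtain ⟨ds', de', heq, _, _, hs, he⟩ :=
    monthsFold_spec (stats.map Prod.snd) PySem.Dict.empty PySem.Dict.empty (by simp) (by simp)
  show ((stats.map Prod.snd).foldl pvMonthStep
      (PySem.Dict.mk [("sms", PySem.Dict.empty), ("email", PySem.Dict.empty)])).items.map
      (fun q => (q.1, q.2.values.sum)) = aggregate_stats_from_service_api_py_alt stats
  have hpre' : ∀ md ∈ stats.map Prod.snd, ∀ q ∈ md, (q.2.map Prod.fst).Nodup := by
    intro md hmd q hq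
    rcases List.mem_map.mp hmd with ⟨p, hp, hpe⟩
    exact hpre p hp q (hpe ▸ hq)
  rw [heq]
  simp only [List.map_cons, List.map_nil]
  rw [hs, he]
  simp [aggregate_stats_from_service_api_py_alt,
    monthTotal_eq "sms" (stats.map Prod.snd) hpre',
    monthTotal_eq "email" (stats.map Prod.snd) hpre',
    PySem.Dict.values, PySem.Dict.empty]
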